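-- pv_equiv track=rewrite | github.com/oj-sec/fishfactory | routines/downloader.py | generate_zip_walkbacks
-- ===== SOURCE A (Python) =====
-- def generate_zip_walkbacks(url):
--
--     prefix = ""
--
--     targets = []
--
--     # Temporarily remove http* prefix to avoid interfering with logic that splits on /.
--     if url.startswith("https://"):
--         prefix = "https://"
--         url = url.replace(prefix, "")
--     elif url.startswith("http://"):
--         prefix = "http://"
--         url = url.replace(prefix, "")
--
--     targets.append(url.rstrip("/-"))
--
--     while True:
--         chunks = url.rsplit('/', 1)
--         remaining = url.split('/')
--
--         targets.append(url.rstrip("/"))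
--
--         # Exit loop when there are no more url endpoints or if there are more than 15, to reduce the impact of timeout bombing.
--         if len(remaining) == 1 or len(remaining) > 15:
--             break
--
--         targets.append(url + ".zip")
--         if url.endswith("php"):
--             temp = url.rstrip("php")
--             temp = temp + "zip"
--             targets.append(temp)
--
--         url = chunks[0]
--
--     # Add http* prefix back to each target.
--     for i in range(len(targets)):
--         targets[i] = prefix + targets[i]
--
--     targets = list(dict.fromkeys(targets))
--
--     return targets
-- ===== SOURCE B (Python) =====
-- def generate_zip_walkbacks(url):
--     # Strip the http* scheme like A does (replace removes every occurrence).
--     prefix = ""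
--     if url.startswith("https://"):
--         prefix = "https://"
--         url = url.replace("https://", "")
--     elif url.startswith("http://"):
--         prefix = "http://"
--         url = url.replace("http://", "")
--
--     # Split ONCE and build the full walkback chain (longest prefix first) up front,
--     # instead of repeatedly rsplitting/splitting the mutated url.
--     segs = url.split('/')
--     n = len(segs)
--     prefixes = []
--     acc = segs[0]
--     for s in segs[1:]:
--         prefixes.append(acc)
--         acc = acc + '/' + s
--     prefixes.append(acc)  # acc == url
--     chain = prefixes[::-1] if 2 <= n <= 15 else [url]
--
--     targets = [url.rstrip('/-')]
--     last = len(chain) - 1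
--     for j, p in enumerate(chain):
--         targets.append(p.rstrip('/'))
--         if j < last:
--             targets.append(p + '.zip')
--             if p.endswith('php'):
--                 targets.append(p.rstrip('php') + 'zip')
--
--     return list(dict.fromkeys(prefix + t for t in targets))
-- ===== Notes on version B (the rewrite author's own statement) =====
-- stated objective: alternative
-- what changed: B splits the url once, builds the whole walkback prefix chain up front with a single accumulating pass, and emits all targets in one loop over that chain, instead of A's while-loop that re-splits and mutates the url via rsplit on every iteration.
import Mathlib
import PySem

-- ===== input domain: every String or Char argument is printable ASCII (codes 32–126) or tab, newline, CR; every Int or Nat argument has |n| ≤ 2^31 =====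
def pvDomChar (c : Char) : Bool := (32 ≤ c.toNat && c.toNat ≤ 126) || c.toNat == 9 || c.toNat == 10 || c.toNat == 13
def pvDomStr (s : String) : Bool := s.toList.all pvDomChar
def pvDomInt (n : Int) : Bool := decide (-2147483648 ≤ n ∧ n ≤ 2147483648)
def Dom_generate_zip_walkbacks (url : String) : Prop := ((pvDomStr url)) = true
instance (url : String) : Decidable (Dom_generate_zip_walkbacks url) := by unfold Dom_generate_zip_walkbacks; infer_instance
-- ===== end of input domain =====

-- B builds the walkback prefix chain up front from a single split instead of A's
-- url-mutating rsplit loop; objective: alternative decomposition (same cost).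

-- ===== PORT A =====

-- hand port of Python str.rstrip(chars) (PySem has no right-only strip with a char set):
-- drop trailing characters that occur in `chars`; exact.
def pvRstripOn (cs chars : List Char) : List Char :=
  (cs.reverse.dropWhile (fun c => chars.contains c)).reverse

-- hand port of url.rsplit('/', 1): split at the LAST '/' when present; exact.
def pvRsplit1 (cs : List Char) : List (List Char) :=
  if '/' ∈ cs then
    [((cs.reverse.dropWhile (fun c => c ≠ '/')).drop 1).reverse,
     (cs.reverse.takeWhile (fun c => c ≠ '/')).reverse]
  else [cs]

-- A's `while True` loop; `fuel` is a totality guard only (fuel = |url|+1 is never exhausted,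
-- since each non-break iteration strictly shortens url).
def loopA : Nat → List Char → List (List Char) → List (List Char)
  | 0, _, targets => targets
  | fuel+1, url, targets =>
    let chunks := pvRsplit1 url
    let remaining := PySem.Chars.splitOn url ['/']
    let targets := targets ++ [pvRstripOn url ['/']]
    if remaining.length = 1 ∨ remaining.length > 15 then targets
    else
      let targets := targets ++ [url ++ ['.', 'z', 'i', 'p']]
      let targets := if PySem.Chars.endswith url ['p', 'h', 'p']
        then targets ++ [pvRstripOn url ['p', 'h', 'p'] ++ ['z', 'i', 'p']]
        else targets
      loopA fuel (PySem.List.pyGetD chunks 0 []) targets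

def generate_zip_walkbacks (url : String) : List String :=
  let cs0 := url.toList
  let pc :=
    if PySem.Chars.startswith cs0 ("https://".toList)
      then ("https://".toList, PySem.Chars.replace cs0 ("https://".toList) [])
    else if PySem.Chars.startswith cs0 ("http://".toList)
      then ("http://".toList, PySem.Chars.replace cs0 ("http://".toList) [])
    else ([], cs0)
  let pre := pc.1
  let cs := pc.2
  let targets := [pvRstripOn cs ['/', '-']]
  let targets := loopA (cs.length + 1) cs targets
  (PySem.List.dedup (targets.map (fun t => pre ++ t))).map (fun t => String.ofList t)

-- ===== PORT B =====

-- body of B's prefix-building for-loop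
def buildChainStep (st : List (List Char) × List Char) (s : List Char) : List (List Char) × List Char :=
  (st.1 ++ [st.2], st.2 ++ '/' :: s)

-- B's emitting for-loop over the chain: zip variants for every element except the last
-- (j < len(chain)-1 ↔ the rest of the chain is nonempty).
def emitB : List (List Char) → List (List Char)
  | [] => []
  | [p] => [pvRstripOn p ['/']]
  | p :: q :: rest =>
      ([pvRstripOn p ['/'], p ++ ['.', 'z', 'i', 'p']] ++
        (if PySem.Chars.endswith p ['p', 'h', 'p']
          then [pvRstripOn p ['p', 'h', 'p'] ++ ['z', 'i', 'p']] else []))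
        ++ emitB (q :: rest)

def generate_zip_walkbacks_alt (url : String) : List String :=
  let cs0 := url.toList
  let pc :=
    if PySem.Chars.startswith cs0 ("https://".toList)
      then ("https://".toList, PySem.Chars.replace cs0 ("https://".toList) [])
    else if PySem.Chars.startswith cs0 ("http://".toList)
      then ("http://".toList, PySem.Chars.replace cs0 ("http://".toList) [])
    else ([], cs0)
  let pre := pc.1
  let cs := pc.2
  let segs := PySem.Chars.splitOn cs ['/']
  let n := segs.length
  let st := (segs.drop 1).foldl buildChainStep ([], PySem.List.pyGetD segs 0 [])
  let prefixes := st.1 ++ [st.2]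
  let chain := if 2 ≤ n ∧ n ≤ 15 then prefixes.reverse else [cs]
  let targets := [pvRstripOn cs ['/', '-']] ++ emitB chain
  (PySem.List.dedup (targets.map (fun t => pre ++ t))).map (fun t => String.ofList t)

-- ===== PRECONDITION & SPEC =====
def Spec_generate_zip_walkbacks (url : String) (out : List String) : Prop := out = generate_zip_walkbacks_alt url
instance (url : String) (out : List String) : Decidable (Spec_generate_zip_walkbacks url out) := by unfold Spec_generate_zip_walkbacks; infer_instance

-- ===== CLAIM (what is proved, stated in full; the proofs are below) =====
def Claim_equal_generate_zip_walkbacks : Prop := ∀ (url : String), Dom_generate_zip_walkbacks url → Spec_generate_zip_walkbacks url (generate_zip_walkbacks url)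

-- ===== LEMMAS AND PROOFS =====

-- simple specification of url.split('/')
def pvSplitC : List Char → List (List Char)
  | [] => [[]]
  | c :: t => if c = '/' then [] :: pvSplitC t else (pvSplitC t).modifyHead (c :: ·)

lemma modifyHead_modifyHead' {α : Type} (f g : α → α) (l : List α) :
    (l.modifyHead g).modifyHead f = l.modifyHead (f ∘ g) := by
  cases l <;> simp

lemma splitOn_go_eq : ∀ (fuel : Nat) (l cur : List Char) (acc : List (List Char)),
    l.length < fuel →
    PySem.Chars.splitOn.go ['/'] fuel l cur acc
      = acc.reverse ++ (pvSplitC l).modifyHead (cur.reverse ++ ·) := by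
  intro fuel
  induction fuel with
  | zero => intro l cur acc h; omega
  | succ f ih =>
    intro l cur acc h
    cases l with
    | nil => simp [PySem.Chars.splitOn.go, pvSplitC]
    | cons c t =>
      by_cases hc : c = '/'
      · subst hc
        have : PySem.Chars.splitOn.go ['/'] (f+1) ('/' :: t) cur acc
            = PySem.Chars.splitOn.go ['/'] f t [] (cur.reverse :: acc) := by
          simp [PySem.Chars.splitOn.go, List.isPrefixOf]
        rw [this, ih t [] (cur.reverse :: acc) (by simpa using Nat.lt_of_succ_lt_succ h)]
        cases hs : pvSplitC t <;> simp [pvSplitC, hs]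
      · have : PySem.Chars.splitOn.go ['/'] (f+1) (c :: t) cur acc
            = PySem.Chars.splitOn.go ['/'] f t (c :: cur) acc := by
          simp [PySem.Chars.splitOn.go, List.isPrefixOf, Ne.symm hc]
        rw [this, ih t (c :: cur) acc (by simpa using Nat.lt_of_succ_lt_succ h)]
        simp [pvSplitC, hc, modifyHead_modifyHead']
        cases pvSplitC t <;> simp

lemma splitOn_eq_splitC (cs : List Char) :
    PySem.Chars.splitOn cs ['/'] = pvSplitC cs := by
  have h := splitOn_go_eq (cs.length + 1) cs [] [] (by omega)
  simpa [PySem.Chars.splitOn] using h.trans (by cases hs : pvSplitC cs <;> simp)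

lemma splitC_ne_nil (cs : List Char) : pvSplitC cs ≠ [] := by
  induction cs with
  | nil => simp [pvSplitC]
  | cons c t ih =>
    by_cases hc : c = '/' <;> simp [pvSplitC, hc]
    cases hs : pvSplitC t
    · exact absurd hs ih
    · simp

lemma splitC_length (cs : List Char) : (pvSplitC cs).length = cs.count '/' + 1 := by
  induction cs with
  | nil => simp [pvSplitC]
  | cons c t ih =>
    by_cases hc : c = '/' <;> simp [pvSplitC, hc, ih]

lemma splitC_no_slash (cs : List Char) (h : '/' ∉ cs) : pvSplitC cs = [cs] := by
  induction cs with
  | nil => simp [pvSplitC]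
  | cons c t ih =>
    have hc : c ≠ '/' := fun hh => h (hh ▸ List.mem_cons_self)
    have ht : '/' ∉ t := fun hh => h (List.mem_cons_of_mem _ hh)
    simp [pvSplitC, hc, ih ht]

lemma splitC_append (b : List Char) (hb : '/' ∉ b) :
    ∀ a, pvSplitC (a ++ '/' :: b) = pvSplitC a ++ [b] := by
  intro a
  induction a with
  | nil => simp [pvSplitC, splitC_no_slash b hb]
  | cons c t ih =>
    by_cases hc : c = '/'
    · simp [pvSplitC, hc, ih]
    · obtain ⟨s0, rest, hs⟩ := List.exists_cons_of_ne_nil (splitC_ne_nil t)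
      simp [pvSplitC, hc, ih, hs]

lemma exists_last_slash (cs : List Char) (h : '/' ∈ cs) :
    ∃ a b, cs = a ++ '/' :: b ∧ '/' ∉ b := by
  set p : Char → Bool := fun c => decide (c ≠ '/') with hp
  have hdrop_ne : cs.reverse.dropWhile p ≠ [] := by
    intro hnil
    have h2 := List.dropWhile_eq_nil_iff.mp hnil '/' (by simpa using h)
    simp [hp] at h2
  obtain ⟨d0, d', hd⟩ := List.exists_cons_of_ne_nil hdrop_ne
  have hd0 : d0 = '/' := by
    have h3 := List.head_dropWhile_not p (l := cs.reverse) hdrop_ne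
    simp only [hd, List.head_cons] at h3
    simpa [hp] using h3
  have h2 : cs.reverse = cs.reverse.takeWhile p ++ '/' :: d' := by
    rw [← hd0, ← hd, List.takeWhile_append_dropWhile]
  refine ⟨d'.reverse, (cs.reverse.takeWhile p).reverse, ?_, ?_⟩
  · have h4 : cs = (cs.reverse.takeWhile p ++ '/' :: d').reverse := by
      rw [← h2, List.reverse_reverse]
    conv_lhs => rw [h4]
    simp
  · intro hmem
    have h5 := List.mem_takeWhile_imp (l := cs.reverse) (p := p) (by simpa using hmem)
    simp [hp] at h5

lemma rsplit1_last (a b : List Char) (hb : '/' ∉ b) :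
    pvRsplit1 (a ++ '/' :: b) = [a, b] := by
  have hmem : '/' ∈ a ++ '/' :: b := by simp
  have hball : ∀ c ∈ b.reverse, (fun c : Char => decide (c ≠ '/')) c = true := by
    intro c hc
    simp only [List.mem_reverse] at hc
    simp
    rintro rfl; exact hb hc
  have hrev : (a ++ '/' :: b).reverse = b.reverse ++ '/' :: a.reverse := by simp
  have hdropb : b.reverse.dropWhile (fun c : Char => decide (c ≠ '/')) = [] :=
    List.dropWhile_eq_nil_iff.mpr (fun x hx => hball x hx)
  have htakeb : b.reverse.takeWhile (fun c : Char => decide (c ≠ '/')) = b.reverse :=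
    List.takeWhile_eq_self_iff.mpr (fun x hx => hball x hx)
  unfold pvRsplit1
  rw [if_pos hmem, hrev]
  rw [List.dropWhile_append, List.takeWhile_append, hdropb, htakeb]
  simp

-- B's prefix table, as a named function of the url (for the induction)
def pvPrefixes (cs : List Char) : List (List Char) :=
  let segs := pvSplitC cs
  let st := (segs.drop 1).foldl buildChainStep ([], PySem.List.pyGetD segs 0 [])
  st.1 ++ [st.2]

lemma prefixes_no_slash (cs : List Char) (h : '/' ∉ cs) : pvPrefixes cs = [cs] := by
  simp [pvPrefixes, splitC_no_slash cs h, PySem.List.pyGetD]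

lemma foldl_buildChainStep_snd : ∀ (l : List (List Char)) (pr : List (List Char)) (acc : List Char),
    (l.foldl buildChainStep (pr, acc)).2 = acc ++ (l.map (fun s => '/' :: s)).flatten := by
  intro l
  induction l with
  | nil => simp
  | cons s t ih => intro pr acc; simp [buildChainStep, ih]

lemma acc_join : ∀ (k : Nat) (cs : List Char), cs.count '/' = k →
    PySem.List.pyGetD (pvSplitC cs) 0 []
      ++ (((pvSplitC cs).drop 1).map (fun s => '/' :: s)).flatten = cs := by
  intro k
  induction k with
  | zero =>
    intro cs hc
    have h0 : '/' ∉ cs := List.count_eq_zero.mp hc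
    simp [splitC_no_slash cs h0, PySem.List.pyGetD]
  | succ k ih =>
    intro cs hc
    have hmem : '/' ∈ cs := List.count_pos_iff.mp (by omega)
    obtain ⟨a, b, rfl, hb⟩ := exists_last_slash cs hmem
    have hca : a.count '/' = k := by
      have := hc
      simp [List.count_append, List.count_eq_zero.mpr hb] at this
      omega
    rw [splitC_append b hb a]
    obtain ⟨s0, rest, hs⟩ := List.exists_cons_of_ne_nil (splitC_ne_nil a)
    have h1 := ih a hca
    rw [hs] at h1 ⊢
    simp only [List.cons_append, PySem.List.pyGetD_zero_cons, List.drop_succ_cons,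
      List.drop_zero, List.map_append, List.flatten_append, List.flatten_cons] at h1 ⊢
    rw [← List.append_assoc, h1]; simp

lemma prefixes_append (a b : List Char) (hb : '/' ∉ b) :
    pvPrefixes (a ++ '/' :: b) = pvPrefixes a ++ [a ++ '/' :: b] := by
  unfold pvPrefixes
  rw [splitC_append b hb a]
  obtain ⟨s0, rest, hs⟩ := List.exists_cons_of_ne_nil (splitC_ne_nil a)
  have hacc : (rest.foldl buildChainStep ([], PySem.List.pyGetD (pvSplitC a) 0 [])).2 = a := by
    have h1 := acc_join (a.count '/') a rfl
    rw [hs] at h1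
    rw [foldl_buildChainStep_snd]
    rw [hs]
    simp [PySem.List.pyGetD] at h1 ⊢
    exact h1
  rw [hs]
  simp only [List.cons_append, List.drop_succ_cons, List.drop_zero]
  rw [List.foldl_append]
  simp only [List.foldl_cons, List.foldl_nil]
  have hGetD : PySem.List.pyGetD (s0 :: (rest ++ [b])) 0 ([] : List Char)
      = PySem.List.pyGetD (s0 :: rest) 0 [] := by
    simp [PySem.List.pyGetD]
  rw [hGetD]
  have hs' : PySem.List.pyGetD (pvSplitC a) 0 ([] : List Char) = PySem.List.pyGetD (s0 :: rest) 0 [] := by rw [hs]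
  rw [← hs'] at *
  rcases hst : rest.foldl buildChainStep ([], PySem.List.pyGetD (pvSplitC a) 0 ([] : List Char)) with ⟨pr, acc⟩
  have hacc' : acc = a := by rw [hst] at hacc; exact hacc
  subst hacc'
  simp [buildChainStep]

lemma prefixes_ne_nil (cs : List Char) : pvPrefixes cs ≠ [] := by
  unfold pvPrefixes
  simp

-- the chain B builds, with the n-bound folded in
def pvChain (cs : List Char) : List (List Char) :=
  if 2 ≤ (pvSplitC cs).length ∧ (pvSplitC cs).length ≤ 15 then (pvPrefixes cs).reverse else [cs]

lemma chain_of_le (cs : List Char) (h : (pvSplitC cs).length ≤ 15) :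
    pvChain cs = (pvPrefixes cs).reverse := by
  unfold pvChain
  by_cases h2 : 2 ≤ (pvSplitC cs).length
  · rw [if_pos ⟨h2, h⟩]
  · rw [if_neg (by tauto)]
    have hl := splitC_length cs
    have hc0 : cs.count '/' = 0 := by omega
    rw [prefixes_no_slash cs (List.count_eq_zero.mp hc0)]
    simp

lemma loop_eq : ∀ (k : Nat) (cs : List Char), cs.count '/' = k →
    ∀ (fuel : Nat), cs.length < fuel → ∀ (ts : List (List Char)),
    loopA fuel cs ts = ts ++ emitB (pvChain cs) := by
  intro k
  induction k with
  | zero =>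
    intro cs hc fuel hf ts
    have h0 : '/' ∉ cs := List.count_eq_zero.mp hc
    have hn : (PySem.Chars.splitOn cs ['/']).length = 1 := by
      rw [splitOn_eq_splitC, splitC_length, hc]
    obtain ⟨f, rfl⟩ := Nat.exists_eq_succ_of_ne_zero (by omega : fuel ≠ 0)
    have hch : pvChain cs = [cs] := by
      unfold pvChain
      rw [if_neg (by rw [splitC_length, hc]; omega)]
    simp only [loopA, hn]
    simp [hch, emitB]
  | succ k ih =>
    intro cs hc fuel hf ts
    have hmem : '/' ∈ cs := List.count_pos_iff.mp (by omega)
    obtain ⟨a, b, rfl, hb⟩ := exists_last_slash cs hmem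
    have hca : a.count '/' = k := by
      simp [List.count_append, List.count_eq_zero.mpr hb] at hc
      omega
    have hlen : (PySem.Chars.splitOn (a ++ '/' :: b) ['/']).length = k + 2 := by
      rw [splitOn_eq_splitC, splitC_length, hc]
    obtain ⟨f, rfl⟩ := Nat.exists_eq_succ_of_ne_zero (by omega : fuel ≠ 0)
    by_cases h15 : k + 2 > 15
    · -- more than 15 segments: single append, chain = [cs]
      have hch : pvChain (a ++ '/' :: b) = [a ++ '/' :: b] := by
        unfold pvChain
        rw [if_neg (by rw [splitC_length, hc]; omega)]
      simp only [loopA, hlen]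
      rw [if_pos (by omega)]
      simp [hch, emitB]
    · -- 2 ≤ n ≤ 15: one full iteration then recurse on a
      have hch : pvChain (a ++ '/' :: b) = (a ++ '/' :: b) :: (pvPrefixes a).reverse := by
        unfold pvChain
        rw [if_pos (by rw [splitC_length, hc]; constructor <;> omega)]
        rw [prefixes_append a b hb]
        simp
      have hcha : pvChain a = (pvPrefixes a).reverse :=
        chain_of_le a (by rw [splitC_length, hca]; omega)
      obtain ⟨q, rest, hq⟩ := List.exists_cons_of_ne_nil
        (by simpa using prefixes_ne_nil a : (pvPrefixes a).reverse ≠ [])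
      have hflen : a.length < f := by
        have hlen2 : (a ++ '/' :: b).length = a.length + (b.length + 1) := by simp
        omega
      have hIH := ih a hca f hflen
      simp only [loopA, hlen]
      rw [if_neg (by omega)]
      rw [rsplit1_last a b hb]
      have hGetD : PySem.List.pyGetD ([a, b] : List (List Char)) 0 [] = a := by
        simp [PySem.List.pyGetD]
      rw [hGetD]
      rw [hch, hq, emitB]
      rw [hIH, hcha, hq]
      by_cases hphp : PySem.Chars.endswith (a ++ '/' :: b) ['p', 'h', 'p'] = true <;>
        simp [hphp]

-- ===== VERDICT (by name: the statement is the Claim_ definition above) =====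
theorem generate_zip_walkbacks_spec : Claim_equal_generate_zip_walkbacks := by
  intro url _
  unfold Spec_generate_zip_walkbacks generate_zip_walkbacks generate_zip_walkbacks_alt
  set pc := (if PySem.Chars.startswith url.toList ("https://".toList)
      then ("https://".toList, PySem.Chars.replace url.toList ("https://".toList) [])
    else if PySem.Chars.startswith url.toList ("http://".toList)
      then ("http://".toList, PySem.Chars.replace url.toList ("http://".toList) [])
    else ([], url.toList)) with hpc
  simp only
  rw [loop_eq (pc.2.count '/') pc.2 rfl (pc.2.length + 1) (by omega)]
  have : emitB (pvChain pc.2)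
      = emitB (if 2 ≤ (PySem.Chars.splitOn pc.2 ['/']).length ∧ (PySem.Chars.splitOn pc.2 ['/']).length ≤ 15
          then (((PySem.Chars.splitOn pc.2 ['/']).drop 1).foldl buildChainStep
                 ([], PySem.List.pyGetD (PySem.Chars.splitOn pc.2 ['/']) 0 [])).1
               ++ [(((PySem.Chars.splitOn pc.2 ['/']).drop 1).foldl buildChainStep
                 ([], PySem.List.pyGetD (PySem.Chars.splitOn pc.2 ['/']) 0 [])).2] |>.reverse
          else [pc.2]) := by
    rw [splitOn_eq_splitC]
    rfl
  rw [this]
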